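-- pv_equiv track=rewrite | github.com/dutchLuck/webtime | write_config.py | obtain_debug_status
-- ===== SOURCE A (Python) =====
-- def obtain_debug_status(data):
--     lines_status = []
--
--     lines_status.append('void  configuration_status( struct config *  opt )  {')
--     for key, value in data.items():
--         if value.get('type', 'N/A') != 'positionParam':
--             short = value.get('short', 'N/A')
--             lines_status.append(f'  printf( "Debug: option -{short} is %sctive (-{short} %s)\\n", (opt->{short}.active) ? "a" : "ina", opt->{short}.helpStr); /* {key} */')
--             config_type = value.get('type')
--             if config_type == 'optStr':
--                 lines_status.append(f'  printf( "Debug: option -{short} value is \\"%s\\"\\n", opt->{short}.optionStr); /* {key} */')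
--             elif config_type == 'optInt':
--                 lines_status.append(f'  printf( "Debug: option -{short} value is %d, limits: %d .. %d\\n", opt->{short}.optionInt, opt->{short}.mostNegLimit, opt->{short}.mostPosLimit); /* {key} */')
--             elif config_type == 'optLng':
--                 lines_status.append(f'  printf( "Debug: option -{short} value is %ld, limits: %ld .. %ld\\n", opt->{short}.optionLng, opt->{short}.mostNegLimit, opt->{short}.mostPosLimit); /* {key} */')
--             elif config_type == 'optDbl':
--                 lines_status.append(f'  printf( "Debug: option -{short} value is %lg, limits: %lg .. %lg\\n", opt->{short}.optionDbl, opt->{short}.mostNegLimit, opt->{short}.mostPosLimit); /* {key} */')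
--             elif config_type == 'optChr':
--                 lines_status.append(f'  printf( "Debug: option -{short} value is \'%c\'\\n", opt->{short}.optionChr); /* {key} */')
--     for key, value in data.items():
--         if value.get('type', 'N/A') == 'positionParam':
--             lines_status.append(f'  printf( "Debug: %s (%s)\\n", opt->{key}.paramNameStr, opt->{key}.helpStr);')
--     return lines_status
-- ===== SOURCE B (Python) =====
-- _TEMPLATES = {
--     'optStr': '  printf( "Debug: option -{s} value is \\"%s\\"\\n", opt->{s}.optionStr); /* {k} */',
--     'optInt': '  printf( "Debug: option -{s} value is %d, limits: %d .. %d\\n", opt->{s}.optionInt, opt->{s}.mostNegLimit, opt->{s}.mostPosLimit); /* {k} */',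
--     'optLng': '  printf( "Debug: option -{s} value is %ld, limits: %ld .. %ld\\n", opt->{s}.optionLng, opt->{s}.mostNegLimit, opt->{s}.mostPosLimit); /* {k} */',
--     'optDbl': '  printf( "Debug: option -{s} value is %lg, limits: %lg .. %lg\\n", opt->{s}.optionDbl, opt->{s}.mostNegLimit, opt->{s}.mostPosLimit); /* {k} */',
--     'optChr': '  printf( "Debug: option -{s} value is \'%c\'\\n", opt->{s}.optionChr); /* {k} */',
-- }
--
--
-- def obtain_debug_status(data):
--     options = ['void  configuration_status( struct config *  opt )  {']
--     positions = []
--     for key, value in data.items():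
--         config_type = value.get('type')
--         if config_type == 'positionParam':
--             positions.append(f'  printf( "Debug: %s (%s)\\n", opt->{key}.paramNameStr, opt->{key}.helpStr);')
--         else:
--             short = value.get('short', 'N/A')
--             options.append(f'  printf( "Debug: option -{short} is %sctive (-{short} %s)\\n", (opt->{short}.active) ? "a" : "ina", opt->{short}.helpStr); /* {key} */')
--             tmpl = _TEMPLATES.get(config_type)
--             if tmpl is not None:
--                 options.append(tmpl.format(s=short, k=key))
--     return options + positions
-- ===== Notes on version B (the rewrite author's own statement) =====
-- stated objective: idiomatic
-- what changed: Single pass over the items appending option lines and positionParam lines to two separate accumulators returned as options+positions (instead of A's two full passes), with the five-way if/elif chain on the type replaced by a one-shot lookup in a template table.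
import Mathlib
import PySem

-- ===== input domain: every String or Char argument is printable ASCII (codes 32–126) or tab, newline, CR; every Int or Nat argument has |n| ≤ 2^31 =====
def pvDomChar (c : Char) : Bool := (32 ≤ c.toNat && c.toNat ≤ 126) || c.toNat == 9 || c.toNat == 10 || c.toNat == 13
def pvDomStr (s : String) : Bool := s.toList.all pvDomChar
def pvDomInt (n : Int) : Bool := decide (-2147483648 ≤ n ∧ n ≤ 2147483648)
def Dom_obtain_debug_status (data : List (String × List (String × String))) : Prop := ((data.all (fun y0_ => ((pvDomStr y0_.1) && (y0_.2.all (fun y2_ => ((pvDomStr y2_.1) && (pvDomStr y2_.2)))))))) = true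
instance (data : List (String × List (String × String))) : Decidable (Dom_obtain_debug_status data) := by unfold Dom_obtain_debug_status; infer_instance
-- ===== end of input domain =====

-- B is a single pass over the items keeping two accumulators (option lines / positionParam
-- lines, returned concatenated) with the if/elif chain replaced by a template-table lookup;
-- objective: more idiomatic, same O(n) cost.

-- shared literal line builders (the exact f-strings of the Python source)
def lineHeader : String := "void  configuration_status( struct config *  opt )  {"
def lineActive (short key : String) : String :=
  "  printf( \"Debug: option -" ++ short ++ " is %sctive (-" ++ short ++ " %s)\\n\", (opt->" ++ short ++ ".active) ? \"a\" : \"ina\", opt->" ++ short ++ ".helpStr); /* " ++ key ++ " */"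
def lineStr (short key : String) : String :=
  "  printf( \"Debug: option -" ++ short ++ " value is \\\"%s\\\"\\n\", opt->" ++ short ++ ".optionStr); /* " ++ key ++ " */"
def lineInt (short key : String) : String :=
  "  printf( \"Debug: option -" ++ short ++ " value is %d, limits: %d .. %d\\n\", opt->" ++ short ++ ".optionInt, opt->" ++ short ++ ".mostNegLimit, opt->" ++ short ++ ".mostPosLimit); /* " ++ key ++ " */"
def lineLng (short key : String) : String :=
  "  printf( \"Debug: option -" ++ short ++ " value is %ld, limits: %ld .. %ld\\n\", opt->" ++ short ++ ".optionLng, opt->" ++ short ++ ".mostNegLimit, opt->" ++ short ++ ".mostPosLimit); /* " ++ key ++ " */"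
def lineDbl (short key : String) : String :=
  "  printf( \"Debug: option -" ++ short ++ " value is %lg, limits: %lg .. %lg\\n\", opt->" ++ short ++ ".optionDbl, opt->" ++ short ++ ".mostNegLimit, opt->" ++ short ++ ".mostPosLimit); /* " ++ key ++ " */"
def lineChr (short key : String) : String :=
  "  printf( \"Debug: option -" ++ short ++ " value is '%c'\\n\", opt->" ++ short ++ ".optionChr); /* " ++ key ++ " */"
def linePos (key : String) : String :=
  "  printf( \"Debug: %s (%s)\\n\", opt->" ++ key ++ ".paramNameStr, opt->" ++ key ++ ".helpStr);"

-- ===== PORT A =====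
def obtain_debug_status (data : List (String × List (String × String))) : List String :=
  let ls0 : List String := [lineHeader]
  let ls1 := data.foldl (fun acc kv =>
    if (PySem.Dict.mk kv.2).getD "type" "N/A" ≠ "positionParam" then
      let short := (PySem.Dict.mk kv.2).getD "short" "N/A"
      let acc := acc ++ [lineActive short kv.1]
      let ct := (PySem.Dict.mk kv.2).get? "type"
      if ct == some "optStr" then acc ++ [lineStr short kv.1]
      else if ct == some "optInt" then acc ++ [lineInt short kv.1]
      else if ct == some "optLng" then acc ++ [lineLng short kv.1]
      else if ct == some "optDbl" then acc ++ [lineDbl short kv.1]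
      else if ct == some "optChr" then acc ++ [lineChr short kv.1]
      else acc
    else acc) ls0
  data.foldl (fun acc kv =>
    if (PySem.Dict.mk kv.2).getD "type" "N/A" = "positionParam" then acc ++ [linePos kv.1]
    else acc) ls1

-- ===== PORT B =====
def debugTemplates : List (String × (String → String → String)) :=
  [("optStr", lineStr), ("optInt", lineInt), ("optLng", lineLng), ("optDbl", lineDbl), ("optChr", lineChr)]

def obtain_debug_status_alt (data : List (String × List (String × String))) : List String :=
  let st := data.foldl (fun (st : List String × List String) kv =>
    let ct := (PySem.Dict.mk kv.2).get? "type"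
    if ct == some "positionParam" then (st.1, st.2 ++ [linePos kv.1])
    else
      let short := (PySem.Dict.mk kv.2).getD "short" "N/A"
      let opts := st.1 ++ [lineActive short kv.1]
      let opts :=
        match ct with
        | none => opts
        | some t =>
          match (PySem.Dict.mk debugTemplates).get? t with
          | none => opts
          | some f => opts ++ [f short kv.1]
      (opts, st.2)) ([lineHeader], ([] : List String))
  st.1 ++ st.2

-- ===== PRECONDITION & SPEC =====
def Spec_obtain_debug_status (data : List (String × List (String × String))) (out : List String) : Prop := out = obtain_debug_status_alt data
instance (data : List (String × List (String × String))) (out : List String) : Decidable (Spec_obtain_debug_status data out) := by unfold Spec_obtain_debug_status; infer_instance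

-- ===== CLAIM (what is proved, stated in full; the proofs are below) =====
def Claim_equal_obtain_debug_status : Prop := ∀ (data : List (String × List (String × String))), Dom_obtain_debug_status data → Spec_obtain_debug_status data (obtain_debug_status data)

-- ===== LEMMAS AND PROOFS =====

-- per-item line groups: what each loop body contributes for one (key, value) pair
def gOpt (kv : String × List (String × String)) : List String :=
  if (PySem.Dict.mk kv.2).getD "type" "N/A" ≠ "positionParam" then
    let short := (PySem.Dict.mk kv.2).getD "short" "N/A"
    let ct := (PySem.Dict.mk kv.2).get? "type"
    lineActive short kv.1 ::
      (if ct == some "optStr" then [lineStr short kv.1]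
       else if ct == some "optInt" then [lineInt short kv.1]
       else if ct == some "optLng" then [lineLng short kv.1]
       else if ct == some "optDbl" then [lineDbl short kv.1]
       else if ct == some "optChr" then [lineChr short kv.1]
       else [])
  else []

def gPos (kv : String × List (String × String)) : List String :=
  if (PySem.Dict.mk kv.2).getD "type" "N/A" = "positionParam" then [linePos kv.1] else []

lemma getD_eq_get? (v : List (String × String)) (k d : String) :
    (PySem.Dict.mk v).getD k d = ((PySem.Dict.mk v).get? k).getD d := rfl

lemma a_fold1 (data : List (String × List (String × String))) (acc : List String) :
    data.foldl (fun acc kv =>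
      if (PySem.Dict.mk kv.2).getD "type" "N/A" ≠ "positionParam" then
        let short := (PySem.Dict.mk kv.2).getD "short" "N/A"
        let acc := acc ++ [lineActive short kv.1]
        let ct := (PySem.Dict.mk kv.2).get? "type"
        if ct == some "optStr" then acc ++ [lineStr short kv.1]
        else if ct == some "optInt" then acc ++ [lineInt short kv.1]
        else if ct == some "optLng" then acc ++ [lineLng short kv.1]
        else if ct == some "optDbl" then acc ++ [lineDbl short kv.1]
        else if ct == some "optChr" then acc ++ [lineChr short kv.1]
        else acc
      else acc) acc = acc ++ data.flatMap gOpt := by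
  induction data generalizing acc with
  | nil => simp
  | cons kv rest ih =>
    simp only [List.foldl_cons, List.flatMap_cons]
    rw [ih]
    have hstep : (if (PySem.Dict.mk kv.2).getD "type" "N/A" ≠ "positionParam" then
        let short := (PySem.Dict.mk kv.2).getD "short" "N/A"
        let acc := acc ++ [lineActive short kv.1]
        let ct := (PySem.Dict.mk kv.2).get? "type"
        if ct == some "optStr" then acc ++ [lineStr short kv.1]
        else if ct == some "optInt" then acc ++ [lineInt short kv.1]
        else if ct == some "optLng" then acc ++ [lineLng short kv.1]
        else if ct == some "optDbl" then acc ++ [lineDbl short kv.1]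
        else if ct == some "optChr" then acc ++ [lineChr short kv.1]
        else acc
      else acc) = acc ++ gOpt kv := by
      simp only [gOpt]
      rw [getD_eq_get?]
      cases hct : (PySem.Dict.mk kv.2).get? "type" with
      | none => simp
      | some t =>
        by_cases h1 : t = "positionParam"
        · simp [h1]
        · simp [h1]
          split_ifs <;> simp
    rw [hstep]
    simp

lemma a_fold2 (data : List (String × List (String × String))) (acc : List String) :
    data.foldl (fun acc kv =>
      if (PySem.Dict.mk kv.2).getD "type" "N/A" = "positionParam" then acc ++ [linePos kv.1]
      else acc) acc = acc ++ data.flatMap gPos := by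
  induction data generalizing acc with
  | nil => simp
  | cons kv rest ih =>
    simp only [List.foldl_cons, List.flatMap_cons]
    rw [ih]
    simp only [gPos]
    split_ifs <;> simp

lemma a_eq_flatMap (data : List (String × List (String × String))) :
    obtain_debug_status data = [lineHeader] ++ data.flatMap gOpt ++ data.flatMap gPos := by
  unfold obtain_debug_status
  simp only [a_fold1, a_fold2]

lemma b_fold_spec (data : List (String × List (String × String))) (o p : List String) :
    data.foldl (fun (st : List String × List String) kv =>
      let ct := (PySem.Dict.mk kv.2).get? "type"
      if ct == some "positionParam" then (st.1, st.2 ++ [linePos kv.1])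
      else
        let short := (PySem.Dict.mk kv.2).getD "short" "N/A"
        let opts := st.1 ++ [lineActive short kv.1]
        let opts :=
          match ct with
          | none => opts
          | some t =>
            match (PySem.Dict.mk debugTemplates).get? t with
            | none => opts
            | some f => opts ++ [f short kv.1]
        (opts, st.2)) (o, p) = (o ++ data.flatMap gOpt, p ++ data.flatMap gPos) := by
  induction data generalizing o p with
  | nil => simp
  | cons kv rest ih =>
    simp only [List.foldl_cons, List.flatMap_cons]
    have hstep : (let ct := (PySem.Dict.mk kv.2).get? "type"
      if ct == some "positionParam" then (o, p ++ [linePos kv.1])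
      else
        let short := (PySem.Dict.mk kv.2).getD "short" "N/A"
        let opts := o ++ [lineActive short kv.1]
        let opts :=
          match ct with
          | none => opts
          | some t =>
            match (PySem.Dict.mk debugTemplates).get? t with
            | none => opts
            | some f => opts ++ [f short kv.1]
        (opts, p)) = (o ++ gOpt kv, p ++ gPos kv) := by
      simp only [gOpt, gPos]
      cases hct : (PySem.Dict.mk kv.2).get? "type" with
      | none => simp [getD_eq_get?, hct]
      | some t =>
        simp only [getD_eq_get?, hct]
        by_cases h1 : t = "positionParam"
        · simp [h1]
        · by_cases h2 : t = "optStr"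
          · subst h2; simp [h1, debugTemplates, PySem.Dict.get?_mk_cons]
          · by_cases h3 : t = "optInt"
            · subst h3; simp [h1, debugTemplates, PySem.Dict.get?_mk_cons]
            · by_cases h4 : t = "optLng"
              · subst h4; simp [h1, debugTemplates, PySem.Dict.get?_mk_cons]
              · by_cases h5 : t = "optDbl"
                · subst h5; simp [h1, debugTemplates, PySem.Dict.get?_mk_cons]
                · by_cases h6 : t = "optChr"
                  · subst h6; simp [h1, debugTemplates, PySem.Dict.get?_mk_cons]
                  · simp [h1, h2, h3, h4, h5, h6, Ne.symm h2, Ne.symm h3,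
                      Ne.symm h4, Ne.symm h5, Ne.symm h6, debugTemplates, PySem.Dict.get?]
    rw [hstep, ih]
    simp

lemma b_eq_flatMap (data : List (String × List (String × String))) :
    obtain_debug_status_alt data = [lineHeader] ++ data.flatMap gOpt ++ data.flatMap gPos := by
  unfold obtain_debug_status_alt
  simp only [b_fold_spec]
  simp

-- ===== VERDICT (by name: the statement is the Claim_ definition above) =====
theorem obtain_debug_status_spec : Claim_equal_obtain_debug_status := by
  intro data _
  unfold Spec_obtain_debug_status
  rw [a_eq_flatMap, b_eq_flatMap]
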